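-- pv_equiv track=rewrite | github.com/TaegyunB/Algorithm | 프로그래머스/0/181918. 배열 만들기 4/배열 만들기 4.py | solution
-- ===== SOURCE A (Python) =====
-- def solution(arr):
--     stk = []
--     i = 0
--
--     while i < len(arr):
--         if len(stk) == 0:
--             stk.append(arr[i])
--             i += 1
--         elif len(stk) != 0:
--             if stk[-1] < arr[i]:
--                 stk.append(arr[i])
--                 i += 1
--             elif stk[-1] >= arr[i]:
--                 stk.pop()
--
--     return stk
-- ===== SOURCE B (Python) =====
-- def solution(arr):
--     # An element survives the monotonic stack iff it is strictly smaller than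
--     # every element to its right: one right-to-left pass keeping a running minimum.
--     out = []
--     m = None
--     for x in reversed(arr):
--         if m is None or x < m:
--             out.append(x)
--             m = x
--     out.reverse()
--     return out
-- ===== Notes on version B (the rewrite author's own statement) =====
-- stated objective: simpler
-- what changed: Replaced the pop-driven monotonic stack (re-examining elements after each pop) by a single right-to-left suffix-minimum scan: an element survives iff it is strictly smaller than every element to its right.
import Mathlib
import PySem

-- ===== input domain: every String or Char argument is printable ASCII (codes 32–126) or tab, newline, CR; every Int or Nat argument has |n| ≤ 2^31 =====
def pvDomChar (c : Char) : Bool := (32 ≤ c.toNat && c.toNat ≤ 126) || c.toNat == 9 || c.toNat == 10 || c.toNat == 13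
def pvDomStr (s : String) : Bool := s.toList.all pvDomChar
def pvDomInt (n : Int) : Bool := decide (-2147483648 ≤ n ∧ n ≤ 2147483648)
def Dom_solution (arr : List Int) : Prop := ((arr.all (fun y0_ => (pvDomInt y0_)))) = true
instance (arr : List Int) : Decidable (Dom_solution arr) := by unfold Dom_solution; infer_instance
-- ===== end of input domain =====

-- B replaces A's pop-driven monotonic stack by a single right-to-left
-- suffix-minimum scan (an element survives iff it is strictly smaller than
-- every element to its right); objective: simpler.


-- ===== PORT A =====
-- The Python while-loop; the stack `stk` is modeled head-as-top (Python appends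
-- at the end and inspects/pops stk[-1]), so the returned stack is reversed once
-- at the end to restore Python's bottom-first list order.
def solutionGo (arr : List Int) (i : Nat) (stk : List Int) : List Int :=
  if h : i < arr.length then
    match stk with
    | [] => solutionGo arr (i + 1) [arr[i]]
    | t :: rest =>
        if t < arr[i] then
          solutionGo arr (i + 1) (arr[i] :: t :: rest)
        else
          solutionGo arr i rest
  else
    stk
termination_by (arr.length - i) * 2 + stk.length
decreasing_by all_goals (simp_all; try omega)

def solution (arr : List Int) : List Int := (solutionGo arr 0 []).reverse

-- ===== PORT B =====
-- foldr traverses arr right-to-left, exactly Source B's `for x in reversed(arr)`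
-- loop over the state (out, m); prepending to the accumulator corresponds to
-- Source B's append followed by the final reverse.
def solution_alt (arr : List Int) : List Int :=
  (arr.foldr
    (fun x (acc : List Int × Option Int) =>
      match acc.2 with
      | none => (x :: acc.1, some x)
      | some m => if x < m then (x :: acc.1, some x) else acc)
    ([], none)).1

-- ===== PRECONDITION & SPEC =====
def Spec_solution (arr : List Int) (out : List Int) : Prop := out = solution_alt arr
instance (arr : List Int) (out : List Int) : Decidable (Spec_solution arr out) := by unfold Spec_solution; infer_instance

-- ===== CLAIM (what is proved, stated in full; the proofs are below) =====
def Claim_equal_solution : Prop := ∀ (arr : List Int), Dom_solution arr → Spec_solution arr (solution arr)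

-- ===== LEMMAS AND PROOFS =====

-- the survivors: elements strictly smaller than everything to their right
def keep : List Int → List Int
  | [] => []
  | x :: s => if s.all (fun y => decide (x < y)) then x :: keep s else keep s

-- running minimum of a list, as tracked by B
def omin : List Int → Option Int
  | [] => none
  | x :: s =>
      match omin s with
      | none => some x
      | some v => some (min x v)

theorem omin_eq_none (s : List Int) : omin s = none ↔ s = [] := by
  cases s with
  | nil => simp [omin]
  | cons x s => simp [omin]; cases h : omin s <;> simp

theorem lt_omin (s : List Int) (x v : Int) (h : omin s = some v) :
    (x < v) ↔ (s.all (fun y => decide (x < y)) = true) := by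
  induction s generalizing v with
  | nil => simp [omin] at h
  | cons y s ih =>
    simp only [omin] at h
    cases hs : omin s with
    | none =>
      have : s = [] := (omin_eq_none s).mp hs
      subst this
      simp [omin] at h
      simp [← h]
    | some w =>
      rw [hs] at h
      have hv : v = min y w := by simpa using h.symm
      subst hv
      simp [ih w hs, List.all_cons]

theorem altPair_eq (s : List Int) :
    s.foldr
      (fun x (acc : List Int × Option Int) =>
        match acc.2 with
        | none => (x :: acc.1, some x)
        | some m => if x < m then (x :: acc.1, some x) else acc)
      ([], none) = (keep s, omin s) := by
  induction s with
  | nil => simp [keep, omin]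
  | cons x s ih =>
    simp only [List.foldr_cons, ih]
    cases hs : omin s with
    | none =>
      have : s = [] := (omin_eq_none s).mp hs
      subst this
      simp [keep, omin]
    | some v =>
      by_cases hx : x < v
      · simp [keep, omin, hs, hx, (lt_omin s x v hs).mp hx, min_eq_left (le_of_lt hx)]
      · have hall : ¬ (s.all (fun y => decide (x < y)) = true) := fun hc =>
          hx ((lt_omin s x v hs).mpr hc)
        simp [keep, omin, hs, hx, hall, min_eq_right (not_lt.mp hx)]

theorem solution_alt_eq_keep (arr : List Int) : solution_alt arr = keep arr := by
  simp [solution_alt, altPair_eq]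

-- main invariant for A's loop: with a strictly decreasing (head-as-top) stack,
-- the loop produces the survivors of the remaining suffix (top-first) on top of
-- the stack elements that are smaller than the whole remaining suffix.
theorem solutionGo_eq (arr : List Int) (i : Nat) (stk : List Int)
    (hs : stk.Pairwise (· > ·)) :
    solutionGo arr i stk =
      (keep (arr.drop i)).reverse ++
        stk.filter (fun t => (arr.drop i).all (fun y => decide (t < y))) := by
  induction i, stk using solutionGo.induct arr with
  | case1 i h ih =>
    have hd : arr.drop i = arr[i] :: arr.drop (i + 1) := (List.getElem_cons_drop h).symm
    rw [solutionGo]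
    simp only [h, dif_pos]
    rw [ih (by simp), hd]
    by_cases hall : ((arr.drop (i+1)).all (fun y => decide (arr[i] < y)) = true)
    · simp [keep, hall]
    · simp [keep, hall]
  | case2 i h t rest hlt ih =>
    have hd : arr.drop i = arr[i] :: arr.drop (i + 1) := (List.getElem_cons_drop h).symm
    rw [solutionGo]
    simp only [h, dif_pos, hlt, if_pos]
    have hmem : ∀ y ∈ t :: rest, y < arr[i] := by
      intro y hy
      rcases List.mem_cons.mp hy with rfl | hy
      · exact hlt
      · exact lt_trans (List.rel_of_pairwise_cons hs hy) hlt
    have hs' : (arr[i] :: t :: rest).Pairwise (· > ·) := List.Pairwise.cons hmem hs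
    rw [ih hs', hd]
    have hfe : List.filter (fun u => (arr[i] :: arr.drop (i+1)).all fun y => decide (u < y)) (t :: rest)
        = List.filter (fun u => (arr.drop (i+1)).all fun y => decide (u < y)) (t :: rest) :=
      List.filter_congr (fun u hu => by rw [List.all_cons]; simp [hmem u hu])
    rw [hfe]
    by_cases hall : ((arr.drop (i+1)).all (fun y => decide (arr[i] < y)) = true)
    · simp [keep, hall, List.filter_cons]
    · simp [keep, hall, List.filter_cons]
  | case3 i h t rest hge ih =>
    have hd : arr.drop i = arr[i] :: arr.drop (i + 1) := (List.getElem_cons_drop h).symm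
    rw [solutionGo]
    simp only [h, dif_pos, hge]
    rw [ih (List.Pairwise.of_cons hs)]
    have hnt : ((arr.drop i).all (fun y => decide (t < y))) = false := by
      rw [hd, List.all_cons]; simp [hge]
    simp [hnt]
  | case4 i stk h =>
    rw [solutionGo]
    simp only [h]
    have hdn : arr.drop i = [] := List.drop_eq_nil_of_le (by omega)
    simp [hdn, keep]

-- ===== VERDICT (by name: the statement is the Claim_ definition above) =====
theorem solution_spec : Claim_equal_solution := by
  intro arr _
  show solution arr = solution_alt arr
  rw [solution, solutionGo_eq arr 0 [] (by simp), solution_alt_eq_keep]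
  simp
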